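-- pv_equiv track=rewrite | github.com/jomardimac/CptS355 | HW1/HW1/HW1.py | digraphs
-- ===== SOURCE A (Python) =====
-- def myKeyGraph(thekey):
--     x,y = thekey
--     return x,y
--
-- def digraphs(ss):
--     #create two iterators for indexing the string:
--     i = 0
--     j = 1
--     #create a string:
--     string = str()
--     #define a list to put in the digraphs:
--     striing = list()
--     #define a dictionary to put the list and frequency in:
--     di = dict()
--     #go through the string:
--     for x in ss[:-1] :
--         #put the string inside the dictionary:
--         string = '/' + ss[i] + ss[j] + '/'
--         #if the string is in the dictionary, update it by adding 1, this will be the frequency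
--         if string in di:
--             di[string] = di.get(string) + 1
--         #if the string is not in the dictionary, add it in.
--         else:
--             di[string] = 1
--
--         i = i + 1
--         j = j + 1
--
--     sorting = sorted(di.items(),key = myKeyGraph)
--
--     return sorting
-- ===== SOURCE B (Python) =====
-- def digraphs(ss):
--     # Build every adjacent digraph string, sort them, then run-length encode
--     # the sorted list; no counting dict is ever built.
--     pairs = sorted('/' + a + b + '/' for a, b in zip(ss, ss[1:]))
--
--     def rle(lst):
--         if not lst:
--             return []
--         x = lst[0]
--         run = 1
--         while run < len(lst) and lst[run] == x:
--             run += 1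
--         return [(x, run)] + rle(lst[run:])
--
--     return rle(pairs)
-- ===== Notes on version B (the rewrite author's own statement) =====
-- stated objective: alternative
-- what changed: Instead of counting digraphs in a dict while walking the string by index and sorting the dict items at the end, B builds the list of digraph strings from zipped adjacent characters, sorts that list, and run-length encodes it into (string, count) pairs - no dict is built.
import Mathlib
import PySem

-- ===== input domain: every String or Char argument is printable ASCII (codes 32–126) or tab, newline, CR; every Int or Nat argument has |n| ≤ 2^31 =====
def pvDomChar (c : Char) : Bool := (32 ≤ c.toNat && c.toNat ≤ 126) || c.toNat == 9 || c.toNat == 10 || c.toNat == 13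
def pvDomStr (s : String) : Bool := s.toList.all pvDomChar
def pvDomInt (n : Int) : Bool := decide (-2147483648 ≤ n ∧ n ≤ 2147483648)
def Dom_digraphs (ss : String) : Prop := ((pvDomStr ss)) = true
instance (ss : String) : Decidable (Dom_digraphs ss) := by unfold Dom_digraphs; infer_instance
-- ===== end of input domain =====

-- B replaces A's index-walking dict counter by sort-then-run-length-encode over the
-- list of adjacent digraph strings (alternative algorithm; no speed claim).

-- ===== PORT A =====
def myKeyGraph (thekey : String × Int) : String × Int := (thekey.1, thekey.2)

-- Loop state is (i, j, string, di) exactly as in A; ss[i]/ss[j] are always in range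
-- (the loop runs len(ss)-1 times), so the .getD default is never used.
def digraphs (ss : String) : List (String × Int) :=
  let st := (PySem.Str.slice ss none (some (-1))).toList.foldl
    (fun (s : Int × Int × String × PySem.Dict String Int) _x =>
      let (i, j, _string, di) := s
      let string := "/" ++ ((PySem.Str.pyGet? ss i).getD ' ').toString
                        ++ ((PySem.Str.pyGet? ss j).getD ' ').toString ++ "/"
      let di := if di.contains string then di.insert string (di.getD string 0 + 1)
                else di.insert string 1
      (i + 1, j + 1, string, di))
    (0, 1, "", PySem.Dict.empty)
  PySem.List.sorted2 st.2.2.2.items (fun p => (myKeyGraph p).1) (fun p => (myKeyGraph p).2) false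

-- ===== PORT B =====
-- run-length encoding of a list: the inner 'while' scanning the run is takeWhile/dropWhile
def rleB : List String → List (String × Int)
  | [] => []
  | x :: xs =>
      (x, (1 : Int) + (xs.takeWhile (· == x)).length) :: rleB (xs.dropWhile (· == x))
  termination_by l => l.length
  decreasing_by
    simp only [List.length_cons]
    exact Nat.lt_succ_of_le (List.length_dropWhile_le _ _)

def digraphs_alt (ss : String) : List (String × Int) :=
  let pairs := PySem.List.sorted
    ((ss.toList.zip (PySem.Str.slice ss (some 1) none).toList).map
      (fun p => "/" ++ p.1.toString ++ p.2.toString ++ "/"))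
    (fun x => x) false
  rleB pairs

-- ===== PRECONDITION & SPEC =====
def Spec_digraphs (ss : String) (out : List (String × Int)) : Prop := out = digraphs_alt ss
instance (ss : String) (out : List (String × Int)) : Decidable (Spec_digraphs ss out) := by unfold Spec_digraphs; infer_instance

-- ===== CLAIM (what is proved, stated in full; the proofs are below) =====
def Claim_equal_digraphs : Prop := ∀ (ss : String), Dom_digraphs ss → Spec_digraphs ss (digraphs ss)

-- ===== LEMMAS AND PROOFS =====

-- the digraph strings of ss, in adjacency order
def dgList (cs : List Char) : List String :=
  (cs.zip cs.tail).map (fun p => "/" ++ p.1.toString ++ p.2.toString ++ "/")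

lemma length_dgList (cs : List Char) : (dgList cs).length = cs.length - 1 := by
  simp [dgList]

lemma dgList_getElem (cs : List Char) (k : Nat) (hk : k < (dgList cs).length) :
    (dgList cs)[k] = "/" ++ (cs[k]'(by simp [dgList] at hk; omega)).toString
      ++ (cs[k+1]'(by simp [dgList] at hk; omega)).toString ++ "/" := by
  simp [dgList, List.getElem_tail]

-- A's fold over the sliced string builds exactly the insert-count fold of the digraph strings
lemma foldA_eq (cs : List Char) (ss : String) (hss : ss.toList = cs) :
    ∀ (t : List Char) (k : Nat) (st : String) (d : PySem.Dict String Int),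
    k + t.length + 1 ≤ cs.length →
    (t.foldl
      (fun (s : Int × Int × String × PySem.Dict String Int) _x =>
        let (i, j, _string, di) := s
        let string := "/" ++ ((PySem.Str.pyGet? ss i).getD ' ').toString
                          ++ ((PySem.Str.pyGet? ss j).getD ' ').toString ++ "/"
        let di := if di.contains string then di.insert string (di.getD string 0 + 1)
                  else di.insert string 1
        (i + 1, j + 1, string, di))
      ((k : Int), (k : Int) + 1, st, d)).2.2.2
    = (((dgList cs).drop k).take t.length).foldl
        (fun d s => d.insert s (d.getD s 0 + 1)) d := by
  intro t
  induction t with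
  | nil => intro k st d _; simp
  | cons c t ih =>
      intro k st d hlen
      simp only [List.length_cons] at hlen
      have hk1 : k < cs.length := by omega
      have hk2 : k + 1 < cs.length := by omega
      have hkd : k < (dgList cs).length := by rw [length_dgList]; omega
      have hg1 : PySem.Str.pyGet? ss (k : Int) = some cs[k] := by
        rw [PySem.Str.pyGet?_natCast, hss]
        exact List.getElem?_eq_getElem hk1
      have hg2 : PySem.Str.pyGet? ss ((k : Int) + 1) = some cs[k+1] := by
        have : ((k : Int) + 1) = ((k + 1 : Nat) : Int) := by push_cast; ring
        rw [this, PySem.Str.pyGet?_natCast, hss]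
        exact List.getElem?_eq_getElem hk2
      have hstr : "/" ++ ((PySem.Str.pyGet? ss (k : Int)).getD ' ').toString
            ++ ((PySem.Str.pyGet? ss ((k : Int) + 1)).getD ' ').toString ++ "/"
          = (dgList cs)[k] := by
        rw [hg1, hg2, dgList_getElem cs k hkd]
        rfl
      have hdrop : (dgList cs).drop k = (dgList cs)[k] :: (dgList cs).drop (k + 1) :=
        List.drop_eq_getElem_cons hkd
      have hstep : ∀ (di : PySem.Dict String Int) (s : String),
          (if di.contains s then di.insert s (di.getD s 0 + 1) else di.insert s 1)
            = di.insert s (di.getD s 0 + 1) := by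
        intro di s
        by_cases hc : di.contains s
        · rw [if_pos hc]
        · rw [if_neg hc, PySem.Dict.getD_of_not_contains _ _ (by simpa using hc)]
          norm_num
      simp only [List.foldl_cons, List.length_cons]
      rw [hdrop]
      simp only [List.take_succ_cons, List.foldl_cons]
      calc _ = (t.foldl
          (fun (s : Int × Int × String × PySem.Dict String Int) _x =>
            let (i, j, _string, di) := s
            let string := "/" ++ ((PySem.Str.pyGet? ss i).getD ' ').toString
                              ++ ((PySem.Str.pyGet? ss j).getD ' ').toString ++ "/"
            let di := if di.contains string then di.insert string (di.getD string 0 + 1)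
                      else di.insert string 1
            (i + 1, j + 1, string, di))
          (((k+1 : Nat) : Int), ((k+1 : Nat) : Int) + 1, (dgList cs)[k],
            (if d.contains (dgList cs)[k] then d.insert (dgList cs)[k] (d.getD (dgList cs)[k] 0 + 1)
             else d.insert (dgList cs)[k] 1))).2.2.2 := by
            congr 1
            simp only [hstr]
            push_cast
            ring_nf
        _ = _ := by
            rw [ih (k+1) _ _ (by omega), hstep]

lemma discard_of_not_mem {x : String} (s : PySem.Set String) (h : x ∉ s) :
    PySem.Set.discard s x = s := by
  unfold PySem.Set.discard
  apply List.filter_eq_self.2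
  intro y hy
  simp only [Bool.not_eq_eq_eq_not, Bool.not_true, beq_eq_false_iff_ne, ne_eq]
  exact fun hyx => h (hyx ▸ hy)

lemma discard_cons_self {x : String} (s : PySem.Set String) :
    PySem.Set.discard (x :: s) x = PySem.Set.discard s x := by
  simp [PySem.Set.discard]

lemma discard_discard {x : String} (s : PySem.Set String) :
    PySem.Set.discard (PySem.Set.discard s x) x = PySem.Set.discard s x := by
  simp [PySem.Set.discard, List.filter_filter]

lemma discard_run_rest {x : String} (run : List String) (hrun : ∀ e ∈ run, e = x) :
    ∀ (rest : List String), x ∉ rest →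
    PySem.Set.discard (PySem.Set.ofList (run ++ rest)) x = PySem.Set.ofList rest := by
  induction run with
  | nil =>
      intro rest hrest
      exact discard_of_not_mem _ (fun h => hrest ((PySem.Set.mem_ofList _ _).1 h))
  | cons y run' ih =>
      intro rest hrest
      have hy : y = x := hrun y List.mem_cons_self
      subst hy
      rw [List.cons_append, PySem.Set.ofList_cons, discard_cons_self, discard_discard]
      exact ih (fun e he => hrun e (List.mem_cons_of_mem _ he)) rest hrest

lemma rest_facts {x : String} (xs : List String) (hp : (x :: xs).Pairwise (· ≤ ·)) :
    (∀ e ∈ xs.dropWhile (· == x), x < e) ∧ (xs.dropWhile (· == x)).Pairwise (· ≤ ·) := by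
  have hxs : xs.Pairwise (· ≤ ·) := hp.of_cons
  have hle : ∀ e ∈ xs, x ≤ e := fun e he => (List.pairwise_cons.1 hp).1 e he
  have hrp : (xs.dropWhile (· == x)).Pairwise (· ≤ ·) := hxs.sublist (List.dropWhile_sublist _)
  refine ⟨?_, hrp⟩
  intro e he
  cases hR : xs.dropWhile (· == x) with
  | nil => rw [hR] at he; simp at he
  | cons y t =>
      have hhead := List.head?_dropWhile_not (· == x) xs
      rw [hR] at hhead
      simp only [List.head?_cons] at hhead
      have hyx : y ≠ x := by simpa using hhead
      have hymem : y ∈ xs := (List.dropWhile_sublist _).mem (by rw [hR]; exact List.mem_cons_self)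
      have hxy : x < y := lt_of_le_of_ne (hle y hymem) (Ne.symm hyx)
      rw [hR] at he
      rcases List.mem_cons.1 he with rfl | het
      · exact hxy
      · have : y ≤ e := (List.pairwise_cons.1 (hR ▸ hrp)).1 e het
        exact lt_of_lt_of_le hxy this

-- run-length encoding of a ≤-sorted list is the ordered dedup paired with counts
lemma rle_sorted : ∀ (L : List String), L.Pairwise (· ≤ ·) →
    rleB L = (PySem.Set.ofList L).map (fun k => (k, (L.count k : Int)))
      ∧ (PySem.Set.ofList L).Pairwise (· < ·) := by
  intro L
  induction L using rleB.induct with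
  | case1 => intro _; exact ⟨by simp [rleB], List.Pairwise.nil⟩
  | case2 x xs ih =>
      intro hp
      obtain ⟨hlt, hrp⟩ := rest_facts xs hp
      have hsplit : xs.takeWhile (· == x) ++ xs.dropWhile (· == x) = xs :=
        List.takeWhile_append_dropWhile
      have hxrest : x ∉ xs.dropWhile (· == x) := fun h => absurd (hlt x h) (lt_irrefl x)
      have hrunx : ∀ e ∈ xs.takeWhile (· == x), e = x := by
        intro e he
        simpa using List.mem_takeWhile_imp he
      obtain ⟨ihEq, ihPw⟩ := ih hrp
      have hofl : PySem.Set.ofList (x :: xs) = x :: PySem.Set.ofList (xs.dropWhile (· == x)) := by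
        have h' := discard_run_rest _ hrunx _ hxrest
        rw [hsplit] at h'
        rw [PySem.Set.ofList_cons, h']
      constructor
      · rw [rleB, hofl, List.map_cons, ihEq]
        congr 1
        · have h1 : (xs.takeWhile (· == x)).count x = (xs.takeWhile (· == x)).length :=
              List.count_eq_length.2 (fun e he => by simpa using (hrunx e he).symm)
          have h2 : (xs.dropWhile (· == x)).count x = 0 := List.count_eq_zero.2 hxrest
          have h3 := congrArg (fun l => List.count x l) hsplit
          simp only [List.count_append, h1, h2] at h3
          have hcx : (x :: xs).count x = 1 + (xs.takeWhile (· == x)).length := by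
            simp
            omega
          rw [hcx]; push_cast; ring_nf
        · apply List.map_congr_left
          intro k hk
          have hkrest : k ∈ xs.dropWhile (· == x) := (PySem.Set.mem_ofList _ _).1 hk
          have hkx : k ≠ x := fun h => hxrest (h ▸ hkrest)
          have h1 : (xs.takeWhile (· == x)).count k = 0 :=
              List.count_eq_zero.2 (fun hkr => hkx (hrunx k hkr))
          have h3 := congrArg (fun l => List.count k l) hsplit
          simp only [List.count_append, h1] at h3
          have hc : (x :: xs).count k = (xs.dropWhile (· == x)).count k := by
            simp [Ne.symm hkx]
            omega
          rw [hc]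
      · rw [hofl]
        exact List.pairwise_cons.2 ⟨fun e he => hlt e ((PySem.Set.mem_ofList _ _).1 he), ihPw⟩

lemma insertBy_congr {α : Type} (b b' : α → α → Bool) (x : α) (ys : List α)
    (h : ∀ y ∈ ys, b x y = b' x y) :
    PySem.List.insertBy b x ys = PySem.List.insertBy b' x ys := by
  induction ys with
  | nil => simp [PySem.List.insertBy]
  | cons y ys ih =>
      have hy := h y (List.mem_cons_self)
      simp only [PySem.List.insertBy, hy]
      split
      · rfl
      · exact congrArg (y :: ·) (ih (fun z hz => h z (List.mem_cons_of_mem _ hz)))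

lemma foldl_insertBy_congr {α : Type} (b b' : α → α → Bool) :
    ∀ (xs : List α) (acc : List α),
    (∀ x ∈ xs, ∀ y, (y ∈ acc ∨ y ∈ xs) → b x y = b' x y) →
    xs.foldl (fun acc x => PySem.List.insertBy b x acc) acc
      = xs.foldl (fun acc x => PySem.List.insertBy b' x acc) acc := by
  intro xs
  induction xs with
  | nil => intro acc _; rfl
  | cons x xs ih =>
      intro acc h
      simp only [List.foldl_cons]
      rw [insertBy_congr b b' x acc (fun y hy => h x List.mem_cons_self y (Or.inl hy))]
      exact ih _ (fun z hz y hy => h z (List.mem_cons_of_mem _ hz) y (by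
        rcases hy with hy | hy
        · rcases (PySem.List.mem_insertBy _ _ _ _).1 hy with rfl | hy
          · exact Or.inr List.mem_cons_self
          · exact Or.inl hy
        · exact Or.inr (List.mem_cons_of_mem _ hy)))

-- Python's tuple key (p[0], p[1]) collapses to the first key when it determines the second
lemma sorted2_eq_sorted (xs : List (String × Int))
    (h : ∀ x ∈ xs, ∀ y ∈ xs, x.1 = y.1 → x.2 = y.2) :
    PySem.List.sorted2 xs (fun p => p.1) (fun p => p.2) false
      = PySem.List.sorted xs (fun p => p.1) false := by
  unfold PySem.List.sorted2 PySem.List.sorted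
  apply foldl_insertBy_congr
  intro x hx y hy
  rcases hy with hy | hy
  · simp at hy
  · by_cases h1 : x.1 < y.1
    · simp [h1]
    · by_cases h2 : y.1 < x.1
      · simp [h1, h2]
      · have : x.1 = y.1 := le_antisymm (le_of_not_gt h2) (le_of_not_gt h1)
        have h3 := h x hx y hy this
        simp [this, h3]

-- ===== VERDICT (by name: the statement is the Claim_ definition above) =====
theorem digraphs_spec : Claim_equal_digraphs := by
  intro ss _
  unfold Spec_digraphs digraphs digraphs_alt
  simp only []
  have hslice1 : (PySem.Str.slice ss (some 1) none).toList = ss.toList.tail := by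
    simp [PySem.Str.slice]; rw [PySem.List.slice_from_one]
  have hsliceA : (PySem.Str.slice ss none (some (-1))).toList = ss.toList.dropLast :=
    PySem.Str.slice_to_neg_one ss
  rw [hslice1, hsliceA]
  have hfold : List.map (fun p => "/" ++ p.1.toString ++ p.2.toString ++ "/")
      (ss.toList.zip ss.toList.tail) = dgList ss.toList := rfl
  rw [hfold]
  by_cases hnil : ss.toList = []
  · simp [hnil, dgList, rleB, PySem.List.sorted, PySem.List.sorted2,
      PySem.Dict.empty]
  -- A's dict is the counter of the digraph strings
  have hdict := foldA_eq ss.toList ss rfl ss.toList.dropLast 0 "" PySem.Dict.empty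
    (by
      have hpos : 0 < ss.toList.length := List.length_pos_iff.2 hnil
      rw [List.length_dropLast]; omega)
  have htake : ((dgList ss.toList).drop 0).take ss.toList.dropLast.length = dgList ss.toList := by
    rw [List.drop_zero, List.length_dropLast]
    exact List.take_of_length_le (by rw [length_dgList])
  rw [htake] at hdict
  simp only [Nat.cast_zero, zero_add] at hdict
  rw [hdict, PySem.Dict.foldl_insert_getD_add_one_eq_counter, PySem.Dict.items_counter]
  -- B's side: run-length of the sorted digraph list
  obtain ⟨hrle, hpw⟩ := rle_sorted (PySem.List.sorted (dgList ss.toList) (fun x => x) false)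
    (PySem.List.sorted_pairwise (dgList ss.toList) (fun x => x))
  rw [hrle]
  have hperm : (PySem.List.sorted (dgList ss.toList) (fun x => x) false).Perm (dgList ss.toList) :=
    PySem.List.sorted_perm (dgList ss.toList) (fun x => x) false
  -- counts over the sorted list equal counts over the original
  have hmapEq : (PySem.Set.ofList (PySem.List.sorted (dgList ss.toList) (fun x => x) false)).map
        (fun k => (k, ((PySem.List.sorted (dgList ss.toList) (fun x => x) false).count k : Int)))
      = (PySem.Set.ofList (PySem.List.sorted (dgList ss.toList) (fun x => x) false)).map
        (fun k => (k, ((dgList ss.toList).count k : Int))) := by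
    apply List.map_congr_left
    intro k _
    rw [hperm.count_eq]
  rw [hmapEq]
  -- the two dedup sets are permutations of each other
  have hsetperm : (PySem.Set.ofList (PySem.List.sorted (dgList ss.toList) (fun x => x) false)).Perm
      (PySem.Set.ofList (dgList ss.toList)) := by
    rw [List.perm_ext_iff_of_nodup (PySem.Set.nodup_ofList _) (PySem.Set.nodup_ofList _)]
    intro k
    rw [PySem.Set.mem_ofList, PySem.Set.mem_ofList, hperm.mem_iff]
  have hX := hsetperm.map (fun k => (k, ((dgList ss.toList).count k : Int)))
  have hXpw : ((PySem.Set.ofList (PySem.List.sorted (dgList ss.toList) (fun x => x) false)).map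
      (fun k => (k, ((dgList ss.toList).count k : Int)))).Pairwise (fun a b => a.1 < b.1) := by
    rw [List.pairwise_map]
    exact hpw
  -- A's sorted2 collapses to sorted on the first key, which names B's list
  have h2 : PySem.List.sorted2
      ((PySem.Set.ofList (dgList ss.toList)).map (fun k => (k, ((dgList ss.toList).count k : Int))))
      (fun p => (myKeyGraph p).1) (fun p => (myKeyGraph p).2) false
      = PySem.List.sorted
      ((PySem.Set.ofList (dgList ss.toList)).map (fun k => (k, ((dgList ss.toList).count k : Int))))
      (fun p => p.1) false := by
    apply sorted2_eq_sorted
    intro x hx y hy hxy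
    simp only [List.mem_map] at hx hy
    obtain ⟨kx, _, rfl⟩ := hx
    obtain ⟨ky, _, rfl⟩ := hy
    simp only at hxy
    simp [hxy]
  rw [h2]
  exact (PySem.List.sorted_eq_of_perm_of_pairwise_lt _ _ (fun p => p.1) hX hXpw)
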